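-- pv_equiv track=rewrite | github.com/jjhazard/FOB | FOB_analysis.py | findValidSegment
-- ===== SOURCE A (Python) =====
-- def findValidSegment(current_index, t_diffs):
--     max_index = len(t_diffs) - 51
--     #While the current index is less than the maximum allowed.
--     while current_index < max_index:
--         #Find the next extended delay
--         while not validExtendedDelay(t_diffs[current_index], t_diffs[current_index + 1]):
--             current_index = current_index + 1
--             #If current index is maximum allowed, stop looking.
--             if current_index == max_index:
--                 return -1
--         #Extended delay found. If valid segment, return the index.
--         if validSegment(current_index, t_diffs):
--             return current_index
--         #If segment fails, try again.
--         current_index = current_index + 1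
--     #Maximum index reached, stop looking.
--     return -1
--
-- def validExtendedDelay(test_delay, second_delay):
--     if test_delay > (6 * second_delay):
--         return True
--     return False
--
-- def validSegment(current_index, t_diffs):
--     #if the intervening delays aren't long or short delays, failure
--     for i in range(1, 50):
--         if not validExtendedDelay(t_diffs[current_index], t_diffs[current_index + i]):
--             return False
--     #if the 50th delay is not extended, failure
--     if not firstTermCloserToSecondThanThird(t_diffs[current_index + 50], t_diffs[current_index], t_diffs[current_index + 1]):
--         return False
--     #The next 50 delays have passed the validity test for the segment
--     return True
--
-- def firstTermCloserToSecondThanThird(first, second, third):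
--     if abs(first - second) < abs(first - third):
--         return True
--     return False
-- ===== SOURCE B (Python) =====
-- def findValidSegment(current_index, t_diffs):
--     # Sliding-window maximum: a monotonic deque holds the indices of the window
--     # t_diffs[ci+1 .. ci+49] with strictly decreasing values; its front is the
--     # window maximum, so the 49 per-index comparisons of the window collapse to one.
--     max_index = len(t_diffs) - 51
--     if current_index >= max_index:
--         return -1
--     dq = []
--     for j in range(current_index + 1, current_index + 49):
--         while dq and t_diffs[dq[-1]] <= t_diffs[j]:
--             dq.pop()
--         dq.append(j)
--     ci = current_index
--     while ci < max_index:
--         j = ci + 49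
--         while dq and t_diffs[dq[-1]] <= t_diffs[j]:
--             dq.pop()
--         dq.append(j)
--         while dq[0] < ci + 1:
--             dq.pop(0)
--         if t_diffs[ci] > 6 * t_diffs[dq[0]] and \
--            abs(t_diffs[ci + 50] - t_diffs[ci]) < abs(t_diffs[ci + 50] - t_diffs[ci + 1]):
--             return ci
--         ci += 1
--     return -1
-- ===== Notes on version B (the rewrite author's own statement) =====
-- stated objective: faster
-- what changed: Replaced A's per-index re-scan of the 49 intervening delays (nested skip-while plus verify helper) by a monotonic-deque sliding-window maximum: B maintains the indices of the window t_diffs[ci+1..ci+49] with strictly decreasing values and tests each candidate against the single front (maximum) value, amortizing the inner 49-element scan away.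
import Mathlib
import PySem

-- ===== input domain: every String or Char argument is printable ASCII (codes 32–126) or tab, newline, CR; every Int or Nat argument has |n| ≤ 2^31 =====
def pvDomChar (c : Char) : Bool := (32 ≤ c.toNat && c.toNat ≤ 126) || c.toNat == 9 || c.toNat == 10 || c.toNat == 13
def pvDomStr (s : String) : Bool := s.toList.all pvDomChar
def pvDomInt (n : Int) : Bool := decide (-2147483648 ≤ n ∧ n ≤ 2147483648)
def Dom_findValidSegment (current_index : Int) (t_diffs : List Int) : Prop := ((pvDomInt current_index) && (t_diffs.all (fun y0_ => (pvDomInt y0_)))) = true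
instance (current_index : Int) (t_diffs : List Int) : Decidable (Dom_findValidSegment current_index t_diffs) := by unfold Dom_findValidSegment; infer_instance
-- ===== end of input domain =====

-- B replaces A's per-index re-scan of the 49 intervening delays by a monotonic-deque
-- sliding-window maximum, so each index is tested against one value, the window max
-- (objective: alternative algorithm/data structure).

-- ===== PORT A =====
-- Python list indexing t[i] (possibly negative); exact under Pre_ (indices in range there).
def pvGet (t : List Int) (i : Int) : Int := PySem.List.pyGetD t i 0

def pvValidExtendedDelay (test_delay second_delay : Int) : Bool :=
  if test_delay > 6 * second_delay then true else false

def pvFirstTermCloser (first second third : Int) : Bool :=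
  if |first - second| < |first - third| then true else false

-- validSegment: the for-loop with early `return False` is the `all` over range(1,50).
def pvValidSegment (current_index : Int) (t_diffs : List Int) : Bool :=
  if (PySem.List.pyRange 1 50 1).all
       (fun i => pvValidExtendedDelay (pvGet t_diffs current_index) (pvGet t_diffs (current_index + i))) then
    if pvFirstTermCloser (pvGet t_diffs (current_index + 50)) (pvGet t_diffs current_index)
         (pvGet t_diffs (current_index + 1)) then true
    else false
  else false

-- inner `while not validExtendedDelay(...)` loop; `none` = `return -1`
def pvInner (t : List Int) (maxI : Int) : Int → Nat → Option Int
  | ci, 0 => some ci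
  | ci, fuel + 1 =>
    if pvValidExtendedDelay (pvGet t ci) (pvGet t (ci + 1)) then some ci
    else if ci + 1 == maxI then none
    else pvInner t maxI (ci + 1) fuel

-- outer `while current_index < max_index` loop
def pvOuter (t : List Int) (maxI : Int) : Int → Nat → Int
  | _, 0 => -1
  | ci, fuel + 1 =>
    if ci < maxI then
      match pvInner t maxI ci (maxI - ci).toNat with
      | none => -1
      | some c => if pvValidSegment c t then c else pvOuter t maxI (c + 1) fuel
    else -1

def findValidSegment (current_index : Int) (t_diffs : List Int) : Int :=
  pvOuter t_diffs ((t_diffs.length : Int) - 51) current_index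
    (((t_diffs.length : Int) - 51 - current_index).toNat + 1)

-- ===== PORT B =====
-- `while dq and t[dq[-1]] <= t[j]: dq.pop()` — pop from the deque's back
def pvSkim (t : List Int) (vj : Int) (dq : List Int) : List Int :=
  if dq ≠ [] ∧ pvGet t (dq.getLastD 0) ≤ vj then pvSkim t vj dq.dropLast else dq
termination_by dq.length
decreasing_by
  rename_i h
  have := h.1
  have : dq.length ≠ 0 := by simpa [List.length_eq_zero_iff] using this
  simp [List.length_dropLast]; omega

-- `while dq[0] < lo: dq.pop(0)` — pop from the front ([] case is a totality guard,
-- unreachable: the just-pushed index ci+49 ≥ lo is always in the deque)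
def pvEvict (lo : Int) : List Int → List Int
  | [] => []
  | d :: rest => if d < lo then pvEvict lo rest else d :: rest

-- the `while ci < max_index` loop of Source B (fuel = number of remaining indices)
def pvMain (t : List Int) (maxI : Int) : Int → List Int → Nat → Int
  | _, _, 0 => -1
  | ci, dq, fuel + 1 =>
    if ci < maxI then
      let dq2 := pvSkim t (pvGet t (ci + 49)) dq ++ [ci + 49]
      let dq3 := pvEvict (ci + 1) dq2
      if pvGet t ci > 6 * pvGet t (dq3.headD 0) ∧
         |pvGet t (ci + 50) - pvGet t ci| < |pvGet t (ci + 50) - pvGet t (ci + 1)| then ci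
      else pvMain t maxI (ci + 1) dq3 fuel
    else -1

def findValidSegment_alt (current_index : Int) (t_diffs : List Int) : Int :=
  let maxI := (t_diffs.length : Int) - 51
  if current_index ≥ maxI then -1
  else
    let dq := (PySem.List.pyRange (current_index + 1) (current_index + 49) 1).foldl
                (fun dq j => pvSkim t_diffs (pvGet t_diffs j) dq ++ [j]) []
    pvMain t_diffs maxI current_index dq (maxI - current_index).toNat

-- ===== PRECONDITION & SPEC =====
-- Pre_ excludes exactly the inputs where Python A (and B alike) raises IndexError:
-- current_index < -len(t_diffs) while current_index < len(t_diffs) - 51.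
def Pre_findValidSegment (current_index : Int) (t_diffs : List Int) : Prop :=
  (-(t_diffs.length : Int) ≤ current_index) ∨ ((t_diffs.length : Int) - 51 ≤ current_index)
instance (current_index : Int) (t_diffs : List Int) : Decidable (Pre_findValidSegment current_index t_diffs) := by
  unfold Pre_findValidSegment; infer_instance

def pvWitness_findValidSegment : Int × List Int := (0, [])

def Spec_findValidSegment (current_index : Int) (t_diffs : List Int) (out : Int) : Prop := out = findValidSegment_alt current_index t_diffs
instance (current_index : Int) (t_diffs : List Int) (out : Int) : Decidable (Spec_findValidSegment current_index t_diffs out) := by unfold Spec_findValidSegment; infer_instance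

-- ===== CLAIM (what is proved, stated in full; the proofs are below) =====
def Claim_equal_findValidSegment : Prop := ∀ (current_index : Int) (t_diffs : List Int), Dom_findValidSegment current_index t_diffs → Pre_findValidSegment current_index t_diffs → Spec_findValidSegment current_index t_diffs (findValidSegment current_index t_diffs)

-- ===== LEMMAS AND PROOFS =====

-- the common reference point: the full window check, and "first index passing it"
def pvCheck (ci : Int) (t : List Int) : Bool :=
  ((PySem.List.pyRange 1 50 1).all (fun i => decide (pvGet t ci > 6 * pvGet t (ci + i)))) &&
  decide (|pvGet t (ci + 50) - pvGet t ci| < |pvGet t (ci + 50) - pvGet t (ci + 1)|)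

def pvFindB (t : List Int) (maxI ci : Int) : Int :=
  match (PySem.List.pyRange ci maxI 1).find? (fun c => pvCheck c t) with
  | some c => c
  | none => -1

theorem findB_stop (t : List Int) (maxI ci : Int) (h : maxI ≤ ci) :
    pvFindB t maxI ci = -1 := by
  simp [pvFindB, PySem.List.pyRange_one_eq_nil h]

theorem findB_step (t : List Int) (maxI ci : Int) (h : ci < maxI) :
    pvFindB t maxI ci = if pvCheck ci t then ci else pvFindB t maxI (ci + 1) := by
  rw [pvFindB, PySem.List.pyRange_one_cons h, List.find?_cons]
  by_cases hc : pvCheck ci t <;> simp [hc, pvFindB]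

-- ---------- A-side: the nested loops compute pvFindB ----------

theorem seg_eq_check (ci : Int) (t : List Int) :
    pvValidSegment ci t = pvCheck ci t := by
  unfold pvValidSegment pvCheck
  have h : (fun i => pvValidExtendedDelay (pvGet t ci) (pvGet t (ci + i)))
      = (fun i : Int => decide (pvGet t ci > 6 * pvGet t (ci + i))) := by
    funext i; simp [pvValidExtendedDelay]
  rw [h]
  cases (PySem.List.pyRange 1 50 1).all (fun i : Int => decide (pvGet t ci > 6 * pvGet t (ci + i))) <;>
    simp [pvFirstTermCloser]

theorem check_false_of_ved_false (ci : Int) (t : List Int)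
    (h : pvValidExtendedDelay (pvGet t ci) (pvGet t (ci + 1)) = false) :
    pvCheck ci t = false := by
  rw [pvCheck, PySem.List.pyRange_one_cons (by norm_num : (1:Int) < 50)]
  simp only [List.all_cons, Bool.and_eq_false_iff]
  left; left
  simpa [pvValidExtendedDelay] using h

theorem outer_stop (t : List Int) (maxI ci : Int) (fuel : Nat) (h : maxI ≤ ci) :
    pvOuter t maxI ci fuel = -1 := by
  cases fuel with
  | zero => rfl
  | succ f => simp [pvOuter, not_lt.mpr h]

theorem inner_eq (t : List Int) (maxI : Int) (fuel : Nat)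
    (IH : ∀ ci, (maxI - ci).toNat ≤ fuel → pvOuter t maxI ci fuel = pvFindB t maxI ci) :
    ∀ (g : Nat) (ci : Int), ci < maxI → (maxI - ci).toNat ≤ g → (maxI - ci).toNat ≤ fuel + 1 →
    (match pvInner t maxI ci g with
     | none => (-1 : Int)
     | some c => if pvValidSegment c t then c else pvOuter t maxI (c + 1) fuel)
      = pvFindB t maxI ci := by
  intro g
  induction g with
  | zero => intro ci hlt hg _; omega
  | succ g ih =>
    intro ci hlt hg hf
    rw [pvInner]
    by_cases hv : pvValidExtendedDelay (pvGet t ci) (pvGet t (ci + 1)) = true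
    · simp only [hv, if_true]
      rw [findB_step t maxI ci hlt, seg_eq_check]
      by_cases hc : pvCheck ci t <;> simp only [hc, if_true]
      rw [IH (ci + 1) (by omega)]
    · simp only [Bool.not_eq_true] at hv
      simp only [hv, Bool.false_eq_true, if_false]
      rw [findB_step t maxI ci hlt, check_false_of_ved_false ci t hv]
      simp only [Bool.false_eq_true, if_false]
      by_cases he : ci + 1 = maxI
      · simp only [he, beq_self_eq_true, if_true]
        rw [findB_stop t maxI maxI le_rfl]
      · have hne : (ci + 1 == maxI) = false := by simp [he]
        simp only [hne, Bool.false_eq_true, if_false]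
        exact ih (ci + 1) (by omega) (by omega) (by omega)

theorem outer_eq (t : List Int) (maxI : Int) :
    ∀ (fuel : Nat) (ci : Int), (maxI - ci).toNat ≤ fuel →
    pvOuter t maxI ci fuel = pvFindB t maxI ci := by
  intro fuel
  induction fuel with
  | zero =>
    intro ci h
    have : maxI ≤ ci := by omega
    rw [outer_stop t maxI ci 0 this, findB_stop t maxI ci this]
  | succ f ih =>
    intro ci h
    by_cases hlt : ci < maxI
    · rw [pvOuter]
      simp only [hlt, if_true]
      exact inner_eq t maxI f ih (maxI - ci).toNat ci hlt le_rfl h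
    · have hle : maxI ≤ ci := by omega
      rw [outer_stop t maxI ci (f + 1) hle, findB_stop t maxI ci hle]

-- ---------- B-side: the monotonic deque computes pvFindB ----------

-- deque invariant for indices pushed so far: lb ≤ indices < m, strictly increasing,
-- values strictly decreasing, and every pushed index ≥ lc is dominated by a deque member
def pvPI (t : List Int) (lb lc m : Int) (A : List Int) : Prop :=
  A.Pairwise (· < ·) ∧
  A.Pairwise (fun a b => pvGet t b < pvGet t a) ∧
  (∀ d ∈ A, lb ≤ d ∧ d < m) ∧
  (∀ k, lc ≤ k → k < m → ∃ d ∈ A, k ≤ d ∧ pvGet t k ≤ pvGet t d)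

theorem pv_getLastD_eq (l : List Int) (h : l ≠ []) : l.getLastD 0 = l.getLast h := by
  induction l with
  | nil => exact absurd rfl h
  | cons a l ih =>
    cases l with
    | nil => rfl
    | cons b m =>
      rw [List.getLast_cons (by simp)]
      rw [← ih (by simp)]
      rfl

theorem mem_dropLast_or_getLast {l : List Int} (h : l ≠ []) {e : Int} (he : e ∈ l) :
    e ∈ l.dropLast ∨ e = l.getLast h := by
  conv at he => rw [← List.dropLast_concat_getLast h]
  rcases List.mem_append.mp he with h1 | h1
  · exact Or.inl h1
  · right; simpa using h1

theorem skim_spec (t : List Int) (vj : Int) (dq : List Int) :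
    (pvSkim t vj dq) <+: dq ∧
    (pvSkim t vj dq = [] ∨ vj < pvGet t ((pvSkim t vj dq).getLastD 0)) ∧
    (∀ e ∈ dq, e ∈ pvSkim t vj dq ∨ pvGet t e ≤ vj) := by
  induction dq using pvSkim.induct t vj with
  | case1 dq h ih =>
    rw [pvSkim, if_pos h]
    obtain ⟨h1, h2, h3⟩ := ih
    refine ⟨h1.trans (List.dropLast_prefix dq), h2, ?_⟩
    intro e he
    rcases mem_dropLast_or_getLast h.1 he with hm | hm
    · exact h3 e hm
    · right
      rw [hm, ← pv_getLastD_eq _ h.1]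
      exact h.2
  | case2 dq h =>
    rw [pvSkim, if_neg h]
    push_neg at h
    by_cases hn : dq = []
    · exact ⟨List.prefix_refl _, Or.inl hn, fun e he => Or.inl he⟩
    · exact ⟨List.prefix_refl _, Or.inr (h hn), fun e he => Or.inl he⟩

-- pushing index m onto a deque satisfying pvPI … m preserves the invariant up to m+1
theorem push_inv (t : List Int) (lb lc m : Int) (A : List Int)
    (hA : pvPI t lb lc m A) (hlb : lb ≤ m) :
    pvPI t lb lc (m + 1) (pvSkim t (pvGet t m) A ++ [m]) ∧
    m ∈ pvSkim t (pvGet t m) A ++ [m] := by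
  obtain ⟨hinc, hdec, hbnd, hcov⟩ := hA
  obtain ⟨hpre, hstop, hdrop⟩ := skim_spec t (pvGet t m) A
  have hsub : ∀ e ∈ pvSkim t (pvGet t m) A, e ∈ A := fun e he => hpre.subset he
  constructor
  · refine ⟨?_, ?_, ?_, ?_⟩
    · rw [List.pairwise_append]
      refine ⟨hinc.sublist hpre.sublist, List.pairwise_singleton _ _, ?_⟩
      intro a ha b hb
      rw [List.mem_singleton] at hb
      rw [hb]
      exact (hbnd a (hsub a ha)).2
    · rw [List.pairwise_append]
      refine ⟨hdec.sublist hpre.sublist, List.pairwise_singleton _ _, ?_⟩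
      intro a ha b hb
      rw [List.mem_singleton] at hb
      rw [hb]
      -- every element of the skimmed deque has value > pvGet t m
      have hSn : pvSkim t (pvGet t m) A ≠ [] := List.ne_nil_of_mem ha
      rcases hstop with hnil | hlast
      · exact absurd hnil hSn
      · rw [pv_getLastD_eq _ hSn] at hlast
        rcases mem_dropLast_or_getLast hSn ha with hm | hm
        · have hsplit : pvSkim t (pvGet t m) A
              = (pvSkim t (pvGet t m) A).dropLast ++ [(pvSkim t (pvGet t m) A).getLast hSn] :=
            (List.dropLast_concat_getLast hSn).symm
          have hdecS := hdec.sublist hpre.sublist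
          rw [hsplit, List.pairwise_append] at hdecS
          have h2 := hdecS.2.2 a hm _ (List.mem_singleton.mpr rfl)
          omega
        · rw [hm]; exact hlast
    · intro d hd
      rcases List.mem_append.mp hd with hm | hm
      · have := hbnd d (hsub d hm); omega
      · rw [List.mem_singleton] at hm; omega
    · intro k hk1 hk2
      by_cases hkm : k = m
      · exact ⟨m, List.mem_append.mpr (Or.inr (List.mem_singleton.mpr rfl)), by omega, by rw [hkm]⟩
      · obtain ⟨d, hd, hkd, hv⟩ := hcov k hk1 (by omega)
        rcases hdrop d hd with hin | hle
        · exact ⟨d, List.mem_append.mpr (Or.inl hin), hkd, hv⟩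
        · exact ⟨m, List.mem_append.mpr (Or.inr (List.mem_singleton.mpr rfl)),
            by have := (hbnd d hd).2; omega, le_trans hv hle⟩
  · exact List.mem_append.mpr (Or.inr (List.mem_singleton.mpr rfl))

-- eviction keeps exactly the (suffix of) elements ≥ lo
theorem evict_spec (lo : Int) (A : List Int) (hinc : A.Pairwise (· < ·)) :
    (pvEvict lo A).Sublist A ∧
    (∀ d ∈ pvEvict lo A, lo ≤ d) ∧
    (∀ e ∈ A, lo ≤ e → e ∈ pvEvict lo A) := by
  induction A with
  | nil => exact ⟨List.Sublist.refl _, by simp [pvEvict], by simp⟩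
  | cons d rest ih =>
    have hr := ih (List.Pairwise.sublist (List.sublist_cons_self d rest) hinc)
    by_cases hd : d < lo
    · rw [pvEvict, if_pos hd]
      refine ⟨hr.1.trans (List.sublist_cons_self d rest), hr.2.1, ?_⟩
      intro e he hle
      rcases List.mem_cons.mp he with he1 | he1
      · omega
      · exact hr.2.2 e he1 hle
    · rw [pvEvict, if_neg hd]
      push_neg at hd
      refine ⟨List.Sublist.refl _, ?_, fun e he _ => he⟩
      intro e he
      rcases List.mem_cons.mp he with he1 | he1
      · omega
      · have := (List.pairwise_cons.mp hinc).1 e he1; omega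

-- the deque front is ≥ every value in the window
theorem head_max (t : List Int) (A : List Int)
    (hdec : A.Pairwise (fun a b => pvGet t b < pvGet t a)) :
    ∀ e ∈ A, pvGet t e ≤ pvGet t (A.headD 0) := by
  cases A with
  | nil => intro e he; cases he
  | cons h rest =>
    intro e he
    rcases List.mem_cons.mp he with he1 | he1
    · rw [he1]; exact le_rfl
    · have := (List.pairwise_cons.mp hdec).1 e he1
      simpa using le_of_lt this

-- the branch condition of pvMain equals pvCheck, given the deque invariant
theorem cond_eq_check (t : List Int) (ci : Int) (dq3 : List Int)
    (hne : dq3 ≠ [])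
    (hbnd : ∀ d ∈ dq3, ci + 1 ≤ d ∧ d < ci + 50)
    (hdec : dq3.Pairwise (fun a b => pvGet t b < pvGet t a))
    (hcov : ∀ k, ci + 1 ≤ k → k < ci + 50 → ∃ d ∈ dq3, k ≤ d ∧ pvGet t k ≤ pvGet t d) :
    (decide (pvGet t ci > 6 * pvGet t (dq3.headD 0)) &&
     decide (|pvGet t (ci + 50) - pvGet t ci| < |pvGet t (ci + 50) - pvGet t (ci + 1)|))
      = pvCheck ci t := by
  rw [pvCheck]
  congr 1
  by_cases hgt : pvGet t ci > 6 * pvGet t (dq3.headD 0)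
  · rw [decide_eq_true hgt]
    symm
    rw [List.all_eq_true]
    intro i hi
    rw [PySem.List.mem_pyRange_one] at hi
    obtain ⟨d, hd, hkd, hv⟩ := hcov (ci + i) (by omega) (by omega)
    have hmax := head_max t dq3 hdec d hd
    simp only [decide_eq_true_eq]
    omega
  · rw [decide_eq_false hgt]
    symm
    rw [Bool.eq_false_iff]
    intro hall
    rw [List.all_eq_true] at hall
    -- the head itself is in the window, so the all-check bounds it
    have hh : dq3.headD 0 ∈ dq3 := by
      cases dq3 with
      | nil => exact absurd rfl hne
      | cons a l => exact List.mem_cons_self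
    have hb := hbnd _ hh
    have := hall (dq3.headD 0 - ci) (by rw [PySem.List.mem_pyRange_one]; omega)
    simp only [decide_eq_true_eq] at this
    have : pvGet t ci > 6 * pvGet t (ci + (dq3.headD 0 - ci)) := this
    rw [show ci + (dq3.headD 0 - ci) = dq3.headD 0 by ring] at this
    omega

-- entry invariant for pvMain at index ci
def pvE (t : List Int) (ci : Int) (A : List Int) : Prop :=
  pvPI t ci (ci + 1) (ci + 49) A

theorem main_eq (t : List Int) (maxI : Int) :
    ∀ (fuel : Nat) (ci : Int) (dq : List Int), (maxI - ci).toNat ≤ fuel →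
    pvE t ci dq → pvMain t maxI ci dq fuel = pvFindB t maxI ci := by
  intro fuel
  induction fuel with
  | zero =>
    intro ci dq h _
    rw [pvMain, findB_stop t maxI ci (by omega)]
  | succ f ih =>
    intro ci dq h hE
    by_cases hlt : ci < maxI
    · rw [pvMain]
      simp only [hlt, if_true]
      -- push index ci+49
      have hpush := push_inv t ci (ci + 1) (ci + 49) dq hE (by omega)
      set dq2 := pvSkim t (pvGet t (ci + 49)) dq ++ [ci + 49] with hdq2
      obtain ⟨⟨hinc2, hdec2, hbnd2, hcov2⟩, hmem2⟩ := hpush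
      -- evict indices < ci+1
      have hev := evict_spec (ci + 1) dq2 hinc2
      set dq3 := pvEvict (ci + 1) dq2 with hdq3
      obtain ⟨hsub3, hlo3, hkeep3⟩ := hev
      have hmem3 : ci + 49 ∈ dq3 := hkeep3 _ hmem2 (by omega)
      have hne3 : dq3 ≠ [] := List.ne_nil_of_mem hmem3
      have hbnd3 : ∀ d ∈ dq3, ci + 1 ≤ d ∧ d < ci + 50 :=
        fun d hd => ⟨hlo3 d hd, by have := (hbnd2 d (hsub3.subset hd)).2; omega⟩
      have hdec3 := hdec2.sublist hsub3
      have hinc3 := hinc2.sublist hsub3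
      have hcov3 : ∀ k, ci + 1 ≤ k → k < ci + 50 →
          ∃ d ∈ dq3, k ≤ d ∧ pvGet t k ≤ pvGet t d := by
        intro k hk1 hk2
        obtain ⟨d, hd, hkd, hv⟩ := hcov2 k hk1 (by omega)
        exact ⟨d, hkeep3 d hd (by omega), hkd, hv⟩
      have hcond := cond_eq_check t ci dq3 hne3 hbnd3 hdec3 hcov3
      rw [findB_step t maxI ci hlt]
      by_cases hc : pvCheck ci t = true
      · rw [hc] at hcond ⊢
        rw [Bool.and_eq_true, decide_eq_true_eq, decide_eq_true_eq] at hcond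
        simp only [hcond.1, hcond.2, and_self, if_pos]
      · rw [Bool.eq_false_iff.mpr hc] at hcond ⊢
        rw [Bool.and_eq_false_iff] at hcond
        have hnc : ¬ (pvGet t ci > 6 * pvGet t (dq3.headD 0) ∧
            |pvGet t (ci + 50) - pvGet t ci| < |pvGet t (ci + 50) - pvGet t (ci + 1)|) := by
          rcases hcond with h1 | h1 <;> simp only [decide_eq_false_iff_not] at h1
          · exact fun hco => h1 hco.1
          · exact fun hco => h1 hco.2
        rw [if_neg hnc, if_neg (by simp)]
        refine ih (ci + 1) dq3 (by omega) ?_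
        refine ⟨hinc3, hdec3, ?_, ?_⟩
        · intro d hd; have := hbnd3 d hd; omega
        · intro k hk1 hk2; exact hcov3 k (by omega) (by omega)
    · rw [pvMain]
      simp only [hlt, if_false]
      rw [findB_stop t maxI ci (by omega)]

-- the init fold builds a deque satisfying the entry invariant
theorem init_inv (t : List Int) (lc : Int) :
    ∀ (n : Nat) (a : Int) (A : List Int), lc ≤ a → pvPI t lc lc a A →
    pvPI t lc lc (a + n) ((PySem.List.pyRange a (a + n) 1).foldl
      (fun dq j => pvSkim t (pvGet t j) dq ++ [j]) A) := by
  intro n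
  induction n with
  | zero => intro a A _ hA; rw [PySem.List.pyRange_one_eq_nil (by omega)]; simpa using hA
  | succ m ih =>
    intro a A hla hA
    rw [PySem.List.pyRange_one_cons (by omega)]
    rw [List.foldl_cons]
    have hp := push_inv t lc lc a A hA hla
    have := ih (a + 1) _ (by omega) hp.1
    rw [show ((m + 1 : Nat) : Int) = (m : Int) + 1 by push_cast; ring,
        show a + ((m : Int) + 1) = a + 1 + (m : Int) by ring]
    exact this

-- specialisation of init_inv to the actual init fold of findValidSegment_alt
theorem init_inv' (t : List Int) (ci : Int) :
    pvE t ci ((PySem.List.pyRange (ci + 1) (ci + 49) 1).foldl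
      (fun dq j => pvSkim t (pvGet t j) dq ++ [j]) []) := by
  have h0 : pvPI t (ci + 1) (ci + 1) (ci + 1) ([] : List Int) := by
    refine ⟨List.Pairwise.nil, List.Pairwise.nil, by simp, ?_⟩
    intro k hk1 hk2; omega
  have := init_inv t (ci + 1) 48 (ci + 1) [] le_rfl h0
  rw [show (ci + 1) + (48 : Nat) = ci + 49 by push_cast; ring] at this
  obtain ⟨h1, h2, h3, h4⟩ := this
  exact ⟨h1, h2, fun d hd => ⟨by have := h3 d hd; omega, (h3 d hd).2⟩, h4⟩

theorem alt_eq_findB (current_index : Int) (t_diffs : List Int) :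
    findValidSegment_alt current_index t_diffs
      = pvFindB t_diffs ((t_diffs.length : Int) - 51) current_index := by
  rw [findValidSegment_alt]
  set maxI := (t_diffs.length : Int) - 51 with hm
  by_cases hge : current_index ≥ maxI
  · rw [if_pos hge, findB_stop t_diffs maxI current_index hge]
  · rw [if_neg hge]
    exact main_eq t_diffs maxI _ current_index _ le_rfl (init_inv' t_diffs current_index)

-- ===== VERDICT (by name: the statement is the Claim_ definition above) =====
theorem findValidSegment_spec : Claim_equal_findValidSegment := by
  intro current_index t_diffs _ _
  unfold Spec_findValidSegment findValidSegment
  rw [alt_eq_findB]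
  exact outer_eq t_diffs ((t_diffs.length : Int) - 51)
    (((t_diffs.length : Int) - 51 - current_index).toNat + 1) current_index (by omega)
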